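-- pv_equiv track=rewrite | github.com/NamanChadha/clara-automation-pipeline | scripts/generate_changelog.py | _categorize_changes
-- ===== SOURCE A (Python) =====
-- from typing import Dict, List
--
-- def _categorize_changes(changes: List[Dict]) -> Dict[str, List[Dict]]:
--     """Categorize changes into logical groups."""
--     categories = {
--         '⏰ Business Hours': [],
--         '🚨 Emergency Configuration': [],
--         '📞 Routing & Transfer': [],
--         '💰 Pricing & Fees': [],
--         '🔧 Integration & Constraints': [],
--         '👤 Contact Info': [],
--         '📝 Other Changes': [],
--     }
--
--     for change in changes:
--         field = change['field']
--         if 'business_hours' in field or 'holiday' in field or 'seasonal' in field: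
--             categories['⏰ Business Hours'].append(change)
--         elif 'emergency' in field:
--             categories['🚨 Emergency Configuration'].append(change)
--         elif 'routing' in field or 'transfer' in field:
--             categories['📞 Routing & Transfer'].append(change)
--         elif 'fee' in field or 'price' in field or 'rate' in field or 'pricing' in field:
--             categories['💰 Pricing & Fees'].append(change)
--         elif 'integration' in field or 'constraint' in field:
--             categories['🔧 Integration & Constraints'].append(change)
--         elif 'contact' in field or 'email' in field or 'name' in field:
--             categories['👤 Contact Info'].append(change)
--         elif 'service' in field.lower():
--              categories['🔧 Integration & Constraints'].append(change)
--         else: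
--             categories['📝 Other Changes'].append(change)
--
--     # Remove empty categories
--     return {k: v for k, v in categories.items() if v}
-- ===== SOURCE B (Python) =====
-- from typing import Dict, List
--
-- _RULES = [
--     ('⏰ Business Hours', ['business_hours', 'holiday', 'seasonal']),
--     ('🚨 Emergency Configuration', ['emergency']),
--     ('📞 Routing & Transfer', ['routing', 'transfer']),
--     ('💰 Pricing & Fees', ['fee', 'price', 'rate', 'pricing']),
--     ('🔧 Integration & Constraints', ['integration', 'constraint']),
--     ('👤 Contact Info', ['contact', 'email', 'name']),
-- ]
--
-- _ORDER = [name for name, _ in _RULES] + ['📝 Other Changes']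
--
--
-- def _label(field):
--     """First rule (in priority order) whose keyword occurs in the field."""
--     for name, keywords in _RULES:
--         if any(kw in field for kw in keywords):
--             return name
--     if 'service' in field.lower():
--         return '🔧 Integration & Constraints'
--     return '📝 Other Changes'
--
--
-- def _categorize_changes(changes: List[Dict]) -> Dict[str, List[Dict]]:
--     """Categorize changes into logical groups."""
--     result = {}
--     for name in _ORDER:
--         group = [c for c in changes if _label(c['field']) == name]
--         if group:
--             result[name] = group
--     return result
-- ===== Notes on version B (the rewrite author's own statement) =====
-- stated objective: alternative
-- what changed: Replaces the mutate-a-dict-of-lists if/elif cascade by a declarative rule table with a pure _label classifier, and builds the result per category by filtering the change list once per category name, so no dict of accumulators is mutated.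
import Mathlib
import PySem

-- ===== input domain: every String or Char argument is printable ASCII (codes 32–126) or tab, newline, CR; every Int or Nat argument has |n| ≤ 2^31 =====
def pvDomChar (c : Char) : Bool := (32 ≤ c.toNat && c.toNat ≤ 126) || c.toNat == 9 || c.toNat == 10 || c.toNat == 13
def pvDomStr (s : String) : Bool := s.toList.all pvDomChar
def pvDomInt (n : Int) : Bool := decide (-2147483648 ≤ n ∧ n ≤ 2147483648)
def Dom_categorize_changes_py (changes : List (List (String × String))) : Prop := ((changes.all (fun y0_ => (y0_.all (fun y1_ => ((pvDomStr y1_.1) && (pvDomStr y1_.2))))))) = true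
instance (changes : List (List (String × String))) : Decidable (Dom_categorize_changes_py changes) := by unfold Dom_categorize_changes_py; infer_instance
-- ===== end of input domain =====

-- B replaces A's mutate-a-dict-of-lists if/elif cascade by a rule table with a pure label
-- classifier and one filter pass per category name (alternative decomposition, same cost).


-- change['field'] : first-match lookup in the association list representing the dict
-- (Pre_ guarantees the key is present, exactly where Python does not raise KeyError)
def pvFieldOf (change : List (String × String)) : String :=
  (PySem.Dict.mk change).getD "field" ""

-- ===== PORT A =====
def pvCatInit : PySem.Dict String (List (List (String × String))) :=
  PySem.Dict.ofList
    [("⏰ Business Hours", []), ("🚨 Emergency Configuration", []),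
     ("📞 Routing & Transfer", []), ("💰 Pricing & Fees", []),
     ("🔧 Integration & Constraints", []), ("👤 Contact Info", []),
     ("📝 Other Changes", [])]

-- loop body of A's `for change in changes:` (list.append ported as `· ++ [change]`)
def pvStepA (categories : PySem.Dict String (List (List (String × String))))
    (change : List (String × String)) : PySem.Dict String (List (List (String × String))) :=
  let field := pvFieldOf change
  if PySem.Str.isIn "business_hours" field || PySem.Str.isIn "holiday" field || PySem.Str.isIn "seasonal" field then
    categories.modify "⏰ Business Hours" [] (· ++ [change])
  else if PySem.Str.isIn "emergency" field then
    categories.modify "🚨 Emergency Configuration" [] (· ++ [change])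
  else if PySem.Str.isIn "routing" field || PySem.Str.isIn "transfer" field then
    categories.modify "📞 Routing & Transfer" [] (· ++ [change])
  else if PySem.Str.isIn "fee" field || PySem.Str.isIn "price" field || PySem.Str.isIn "rate" field || PySem.Str.isIn "pricing" field then
    categories.modify "💰 Pricing & Fees" [] (· ++ [change])
  else if PySem.Str.isIn "integration" field || PySem.Str.isIn "constraint" field then
    categories.modify "🔧 Integration & Constraints" [] (· ++ [change])
  else if PySem.Str.isIn "contact" field || PySem.Str.isIn "email" field || PySem.Str.isIn "name" field then
    categories.modify "👤 Contact Info" [] (· ++ [change])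
  else if PySem.Str.isIn "service" (PySem.Str.lower field) then
    categories.modify "🔧 Integration & Constraints" [] (· ++ [change])
  else
    categories.modify "📝 Other Changes" [] (· ++ [change])

def categorize_changes_py (changes : List (List (String × String))) : List (String × List (List (String × String))) :=
  (changes.foldl pvStepA pvCatInit).items.filter (fun kv => !kv.2.isEmpty)

-- ===== PORT B =====
def pvRules : List (String × List String) :=
  [("⏰ Business Hours", ["business_hours", "holiday", "seasonal"]),
   ("🚨 Emergency Configuration", ["emergency"]),
   ("📞 Routing & Transfer", ["routing", "transfer"]),
   ("💰 Pricing & Fees", ["fee", "price", "rate", "pricing"]),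
   ("🔧 Integration & Constraints", ["integration", "constraint"]),
   ("👤 Contact Info", ["contact", "email", "name"])]

def pvOrder : List String := pvRules.map (·.1) ++ ["📝 Other Changes"]

-- B's `for name, keywords in _RULES:` loop with early return, as structural recursion
def pvFirstRule (field : String) : List (String × List String) → Option String
  | [] => none
  | r :: rs => if r.2.any (fun kw => PySem.Str.isIn kw field) then some r.1 else pvFirstRule field rs

def pvLabel (field : String) : String :=
  match pvFirstRule field pvRules with
  | some name => name
  | none =>
    if PySem.Str.isIn "service" (PySem.Str.lower field) then "🔧 Integration & Constraints"
    else "📝 Other Changes"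

def categorize_changes_py_alt (changes : List (List (String × String))) : List (String × List (List (String × String))) :=
  pvOrder.filterMap (fun name =>
    let group := changes.filter (fun c => pvLabel (pvFieldOf c) == name)
    if group.isEmpty then none else some (name, group))

-- ===== PRECONDITION & SPEC =====
-- Pre_: every change dict has a 'field' key; elsewhere Python A raises KeyError.
def Pre_categorize_changes_py (changes : List (List (String × String))) : Prop :=
  ∀ c ∈ changes, c.any (fun p => p.1 == "field") = true
instance (changes : List (List (String × String))) : Decidable (Pre_categorize_changes_py changes) := by unfold Pre_categorize_changes_py; infer_instance

def pvWitness_categorize_changes_py : (List (List (String × String))) :=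
  [[("field", "service fee update")], [("field", "holiday hours")]]

def Spec_categorize_changes_py (changes : List (List (String × String))) (out : List (String × List (List (String × String)))) : Prop := out = categorize_changes_py_alt changes
instance (changes : List (List (String × String))) (out : List (String × List (List (String × String)))) : Decidable (Spec_categorize_changes_py changes out) := by unfold Spec_categorize_changes_py; infer_instance

-- ===== CLAIM (what is proved, stated in full; the proofs are below) =====
def Claim_equal_categorize_changes_py : Prop := ∀ (changes : List (List (String × String))), Dom_categorize_changes_py changes → Pre_categorize_changes_py changes → Spec_categorize_changes_py changes (categorize_changes_py changes)

-- ===== LEMMAS AND PROOFS =====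

-- A's cascade, read as a classifier returning the chosen key.
def pvLabelA (field : String) : String :=
  if PySem.Str.isIn "business_hours" field || PySem.Str.isIn "holiday" field || PySem.Str.isIn "seasonal" field then
    "⏰ Business Hours"
  else if PySem.Str.isIn "emergency" field then "🚨 Emergency Configuration"
  else if PySem.Str.isIn "routing" field || PySem.Str.isIn "transfer" field then "📞 Routing & Transfer"
  else if PySem.Str.isIn "fee" field || PySem.Str.isIn "price" field || PySem.Str.isIn "rate" field || PySem.Str.isIn "pricing" field then
    "💰 Pricing & Fees"
  else if PySem.Str.isIn "integration" field || PySem.Str.isIn "constraint" field then "🔧 Integration & Constraints"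
  else if PySem.Str.isIn "contact" field || PySem.Str.isIn "email" field || PySem.Str.isIn "name" field then "👤 Contact Info"
  else if PySem.Str.isIn "service" (PySem.Str.lower field) then "🔧 Integration & Constraints"
  else "📝 Other Changes"

theorem stepA_eq (d : PySem.Dict String (List (List (String × String)))) (c : List (String × String)) :
    pvStepA d c = d.modify (pvLabelA (pvFieldOf c)) [] (· ++ [c]) := by
  unfold pvStepA pvLabelA
  dsimp only
  split_ifs <;> rfl

theorem label_eq (f : String) : pvLabel f = pvLabelA f := by
  unfold pvLabel pvLabelA pvRules
  simp only [pvFirstRule, List.any_cons, List.any_nil, Bool.or_false]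
  split_ifs <;> simp_all

theorem labelA_mem (f : String) : pvLabelA f ∈ pvCatInit.keys := by
  unfold pvLabelA
  split_ifs <;> decide

theorem update_of_subset (s : List String) (l : List String) (h : ∀ x ∈ l, x ∈ s) :
    PySem.Set.update s l = s := by
  induction l generalizing s with
  | nil => exact PySem.Set.update_nil s
  | cons x l ih =>
    show PySem.Set.update s (x :: l) = s
    have hx : PySem.Set.add s x = s := PySem.Set.add_of_mem (h x (by simp))
    calc PySem.Set.update s (x :: l)
        = PySem.Set.update (PySem.Set.add s x) l := rfl
      _ = PySem.Set.update s l := by rw [hx]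
      _ = s := ih s (fun y hy => h y (by simp [hy]))

theorem foldl_fused (changes : List (List (String × String)))
    (d : PySem.Dict String (List (List (String × String)))) :
    changes.foldl pvStepA d =
      (changes.map (fun c => (pvLabelA (pvFieldOf c), c))).foldl
        (fun d p => d.modify p.1 [] (· ++ [p.2])) d := by
  rw [List.foldl_map]
  induction changes generalizing d with
  | nil => rfl
  | cons c l ih => simp only [List.foldl_cons, stepA_eq, ih]

theorem getD_final (changes : List (List (String × String))) (k : String)
    (hk0 : pvCatInit.getD k [] = []) :
    (changes.foldl pvStepA pvCatInit).getD k [] =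
      changes.filter (fun c => pvLabelA (pvFieldOf c) == k) := by
  rw [foldl_fused, PySem.Dict.getD_foldl_modify_append, hk0, List.filter_map, List.map_map]
  simp [Function.comp_def]

theorem foldA_items (changes : List (List (String × String))) :
    (changes.foldl pvStepA pvCatInit).items =
      pvCatInit.keys.map (fun k => (k, changes.filter (fun c => pvLabelA (pvFieldOf c) == k))) := by
  have hkeys : (changes.foldl pvStepA pvCatInit).keys = pvCatInit.keys := by
    rw [foldl_fused, PySem.Dict.keys_foldl_modify_key _ Prod.fst [] (fun _ p v => v ++ [p.2]),
      List.map_map]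
    apply update_of_subset
    intro x hx
    simp only [List.mem_map, Function.comp] at hx
    obtain ⟨c, -, rfl⟩ := hx
    exact labelA_mem _
  have hnd : (changes.foldl pvStepA pvCatInit).keys.Nodup := by rw [hkeys]; decide
  rw [PySem.Dict.items_eq_map_keys _ hnd [], hkeys]
  apply List.map_congr_left
  intro k hk
  have hkl : pvCatInit.keys = ["⏰ Business Hours", "🚨 Emergency Configuration",
      "📞 Routing & Transfer", "💰 Pricing & Fees", "🔧 Integration & Constraints",
      "👤 Contact Info", "📝 Other Changes"] := by decide
  have hk0 : pvCatInit.getD k [] = [] := by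
    rw [hkl] at hk
    fin_cases hk <;> decide
  rw [getD_final changes k hk0]

theorem filterMap_eq_map_filter {α : Type} (ks : List String) (g : String → List α) :
    ks.filterMap (fun k => let v := g k; if v.isEmpty then none else some (k, v)) =
      (ks.map (fun k => (k, g k))).filter (fun p => !p.2.isEmpty) := by
  induction ks with
  | nil => rfl
  | cons k ks ih =>
    simp only [List.filterMap_cons, List.map_cons, List.filter_cons]
    by_cases h : (g k).isEmpty <;> simp [h] <;> simpa using ih

-- ===== VERDICT (by name: the statement is the Claim_ definition above) =====
theorem categorize_changes_py_spec : Claim_equal_categorize_changes_py := by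
  intro changes _ _
  show categorize_changes_py changes = categorize_changes_py_alt changes
  unfold categorize_changes_py categorize_changes_py_alt
  rw [foldA_items, filterMap_eq_map_filter]
  have : pvOrder = pvCatInit.keys := by decide
  rw [this]
  congr 1
  simp only [label_eq]
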